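-- pv_equiv track=rewrite | github.com/AlexLimCor/TP-Algo-Guarna-Maquina | etapa9.py | Participantes
-- ===== SOURCE A (Python) =====
-- def Participantes(lista_jugadores):
--     '''
--     Recibe un lista_jugadores y retorna un diccionario donde se almacena la posicion, la cantidad de aciertos y errores del jugador
--     ejemplo: dicc_participantes = {"nombre":[posicion,ACIERTO,ERRORES]}
--     '''
--     ACIERTO = 0
--     ERRORES = 0
--     posicion = 1
--     dicc_participantes = {}
--     for element in lista_jugadores:
--         if not element in dicc_participantes:
--             dicc_participantes[element] = [posicion,ACIERTO,ERRORES]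
--             posicion +=1
--     return dicc_participantes
-- ===== SOURCE B (Python) =====
-- def Participantes(lista_jugadores):
--     '''
--     Misma tabla que A, construida al reves: una pasada hacia atras que registra
--     (sobrescribiendo) el indice de primera aparicion de cada nombre, y luego un
--     ordenamiento de los pares por ese indice para numerar las posiciones desde 1.
--     '''
--     first = {}
--     for i, nombre in reversed(list(enumerate(lista_jugadores))):
--         first[nombre] = i
--     orden = sorted(first.items(), key=lambda kv: kv[1])
--     return {nombre: [pos, 0, 0] for pos, (nombre, _idx) in enumerate(orden, 1)}
-- ===== Notes on version B (the rewrite author's own statement) =====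
-- stated objective: alternative
-- what changed: Instead of one forward pass with a dict membership test and a manually incremented position counter, B makes a backwards overwrite pass recording each name's first-occurrence index, then sorts the (name, index) pairs by that index and numbers positions by enumerating the sorted list.
import Mathlib
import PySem

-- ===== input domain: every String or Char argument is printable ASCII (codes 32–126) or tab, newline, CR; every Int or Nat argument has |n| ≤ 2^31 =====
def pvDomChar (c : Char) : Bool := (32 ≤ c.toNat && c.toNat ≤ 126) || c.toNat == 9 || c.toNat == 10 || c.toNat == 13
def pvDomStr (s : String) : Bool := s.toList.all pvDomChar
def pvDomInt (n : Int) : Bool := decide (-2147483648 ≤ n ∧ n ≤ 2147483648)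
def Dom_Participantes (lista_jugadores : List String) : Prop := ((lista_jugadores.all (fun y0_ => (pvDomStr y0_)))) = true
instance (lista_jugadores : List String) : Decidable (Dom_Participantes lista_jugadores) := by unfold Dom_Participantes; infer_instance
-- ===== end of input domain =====

-- B builds the same table by a different route: a backwards overwrite pass recording each
-- name's first-occurrence index, then a sort of the (name, index) pairs by that index
-- (objective: alternative algorithm, same result).

-- ===== PORT A =====
-- A's loop body: conditionally insert and bump the position counter.
def Participantes_step (st : PySem.Dict String (List Int) × Int) (element : String) :
    PySem.Dict String (List Int) × Int :=
  if ¬ (st.1.contains element) then (st.1.insert element [st.2, 0, 0], st.2 + 1) else st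

def Participantes (lista_jugadores : List String) : List (String × List Int) :=
  (lista_jugadores.foldl Participantes_step (PySem.Dict.empty, 1)).1.items

-- ===== PORT B =====
def Participantes_alt (lista_jugadores : List String) : List (String × List Int) :=
  -- for i, nombre in reversed(list(enumerate(lista_jugadores))): first[nombre] = i
  let first : PySem.Dict String Int :=
    ((PySem.List.enumerate lista_jugadores 0).reverse).foldl
      (fun d p => d.insert p.2 p.1) PySem.Dict.empty
  -- orden = sorted(first.items(), key=lambda kv: kv[1])
  let orden := PySem.List.sorted first.items (fun kv => kv.2) false
  -- {nombre: [pos, 0, 0] for pos, (nombre, _idx) in enumerate(orden, 1)}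
  (PySem.List.enumerate orden 1).map (fun q => (q.2.1, [q.1, 0, 0]))

-- ===== PRECONDITION & SPEC =====
def Spec_Participantes (lista_jugadores : List String) (out : List (String × List Int)) : Prop := out = Participantes_alt lista_jugadores
instance (lista_jugadores : List String) (out : List (String × List Int)) : Decidable (Spec_Participantes lista_jugadores out) := by unfold Spec_Participantes; infer_instance

-- ===== CLAIM (what is proved, stated in full; the proofs are below) =====
def Claim_equal_Participantes : Prop := ∀ (lista_jugadores : List String), Dom_Participantes lista_jugadores → Spec_Participantes lista_jugadores (Participantes lista_jugadores)

-- ===== LEMMAS AND PROOFS =====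

-- ---- A side: the dict A has built after seeing exactly the distinct players u (in order).
def pvToD (u : List String) : PySem.Dict String (List Int) :=
  PySem.Dict.mk ((PySem.List.enumerate u 1).map (fun p => (p.2, [p.1, 0, 0])))

theorem pvToD_contains (u : List String) (x : String) :
    (pvToD u).contains x = u.contains x := by
  have h : List.map (fun p => p.2) (PySem.List.enumerate u 1) = u :=
    PySem.List.map_snd_enumerate u 1
  simp only [pvToD, PySem.Dict.contains, List.any_map]
  rw [show (((fun p => (p.1 == x)) ∘ fun (p : Int × String) => (p.2, ([p.1, 0, 0] : List Int))))
        = ((fun y => (y == x)) ∘ fun (p : Int × String) => p.2) from rfl,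
      ← List.any_map, h, List.contains_eq_any_beq]
  simp [Bool.beq_comm]

theorem pvToD_snoc (u : List String) (x : String) (h : u.contains x = false) :
    (pvToD u).insert x [(u.length : Int) + 1, 0, 0] = pvToD (u ++ [x]) := by
  have hc : (pvToD u).contains x = false := by rw [pvToD_contains]; exact h
  unfold PySem.Dict.insert
  rw [hc]
  simp [pvToD, PySem.List.enumerate_append, PySem.List.enumerate, add_comm]

theorem pvKey (l : List String) : ∀ (u : List String),
    (l.foldl Participantes_step (pvToD u, (u.length : Int) + 1)).1.items
    = (PySem.List.enumerate (l.foldl PySem.Set.add u) 1).map (fun p => (p.2, [p.1, 0, 0])) := by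
  induction l with
  | nil => intro u; simp [pvToD]
  | cons x t ih =>
    intro u
    rw [List.foldl_cons, List.foldl_cons]
    by_cases h : u.contains x = true
    · have hm : x ∈ u := by simpa using h
      have h1 : Participantes_step (pvToD u, (u.length : Int) + 1) x
          = (pvToD u, (u.length : Int) + 1) := by
        simp [Participantes_step, pvToD_contains, hm]
      have h2 : PySem.Set.add u x = u := by
        simp [PySem.Set.add, PySem.Set.contains, hm]
      rw [h1, h2]; exact ih u
    · have h' : u.contains x = false := by simpa using h
      have hc : (pvToD u).contains x = false := by rw [pvToD_contains]; exact h'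
      have h1 : Participantes_step (pvToD u, (u.length : Int) + 1) x
          = (pvToD (u ++ [x]), ((u ++ [x]).length : Int) + 1) := by
        unfold Participantes_step
        rw [if_pos (by simp [hc])]
        refine Prod.ext ?_ ?_
        · exact pvToD_snoc u x h'
        · simp
      have h2 : PySem.Set.add u x = u ++ [x] := by
        have hm : x ∉ u := by simpa using h'
        simp [PySem.Set.add, PySem.Set.contains, hm]
      rw [h1, h2]; exact ih (u ++ [x])

-- A's result in closed form: positions 1.. along the ordered dedup.
theorem pvA_eq (l : List String) :
    Participantes l
    = (PySem.List.enumerate (PySem.List.dedup l) 1).map (fun p => (p.2, [p.1, 0, 0])) := by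
  have h0 : (PySem.Dict.empty : PySem.Dict String (List Int)) = pvToD [] := by
    simp [pvToD, PySem.Dict.empty, PySem.List.enumerate]
  have hk := pvKey l []
  simp only [List.length_nil, Nat.cast_zero, zero_add] at hk
  simp only [Participantes, h0, hk, PySem.List.dedup_eq_ofList, PySem.Set.ofList, PySem.Set.empty]

-- ---- B side.
-- Lookup in a fold of overwriting inserts: the LAST pair written for the key wins.
theorem pvGetFold (ps : List (Int × String)) (d : PySem.Dict String Int) (x : String) :
    ((ps.foldl (fun d p => d.insert p.2 p.1) d).get? x)
    = ((ps.reverse.find? (fun p => p.2 == x)).map Prod.fst).or (d.get? x) := by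
  induction ps generalizing d with
  | nil => simp
  | cons p t ih =>
    rw [List.foldl_cons, ih, List.reverse_cons, List.find?_append]
    cases hf : t.reverse.find? (fun p => p.2 == x) with
    | some q => simp
    | none =>
      by_cases hx : p.2 = x
      · subst hx; simp
      · have hxne : x ≠ p.2 := fun h => hx h.symm
        simp [hx, hxne, PySem.Dict.get?_insert]

-- First match in an enumeration is the first occurrence index.
theorem pvFindEnum (l : List String) (s : Int) (x : String) (h : x ∈ l) :
    (PySem.List.enumerate l s).find? (fun p => p.2 == x) = some (s + (l.idxOf x : Int), x) := by
  induction l generalizing s with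
  | nil => cases h
  | cons y t ih =>
    rw [PySem.List.enumerate_cons]
    by_cases hy : y = x
    · subst hy; simp
    · have hx : x ∈ t := by cases h with | head => exact absurd rfl hy | tail _ h => exact h
      rw [List.find?_cons_of_neg (by simp [hy]), ih (s + 1) hx]
      have : (y :: t).idxOf x = t.idxOf x + 1 := by
        simp [hy]
      rw [this]; push_cast; ring_nf

-- enumerate over a mapped list.
theorem pvEnumMap {α β : Type} (f : α → β) (xs : List α) (s : Int) :
    PySem.List.enumerate (xs.map f) s = (PySem.List.enumerate xs s).map (fun p => (p.1, f p.2)) := by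
  induction xs generalizing s with
  | nil => rfl
  | cons x t ih => simp [PySem.List.enumerate_cons, ih]

-- The ordered dedup's elements have strictly increasing first-occurrence indices.
theorem pvDedupMono (l : List String) :
    (PySem.List.dedup l).Pairwise (fun a b => ((l.idxOf a : Int) < (l.idxOf b : Int))) := by
  rw [PySem.List.dedup_eq_ofList]
  induction l using List.reverseRecOn with
  | nil => simp [PySem.Set.ofList]
  | append_singleton xs x ih =>
    rw [PySem.Set.ofList_append_singleton]
    by_cases hx : x ∈ PySem.Set.ofList xs
    · rw [PySem.Set.add_of_mem hx]
      refine ih.imp_of_mem ?_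
      intro a b ha hb hab
      have ha' : a ∈ xs := (PySem.Set.mem_ofList _ _).1 ha
      have hb' : b ∈ xs := (PySem.Set.mem_ofList _ _).1 hb
      rwa [List.idxOf_append_of_mem ha', List.idxOf_append_of_mem hb']
    · have hx' : x ∉ xs := fun hm => hx ((PySem.Set.mem_ofList _ _).2 hm)
      rw [PySem.Set.add_of_not_mem hx, List.pairwise_append]
      refine ⟨ih.imp_of_mem ?_, List.pairwise_singleton _ _, ?_⟩
      · intro a b ha hb hab
        have ha' : a ∈ xs := (PySem.Set.mem_ofList _ _).1 ha
        have hb' : b ∈ xs := (PySem.Set.mem_ofList _ _).1 hb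
        rwa [List.idxOf_append_of_mem ha', List.idxOf_append_of_mem hb']
      · intro a ha b hb
        have ha' : a ∈ xs := (PySem.Set.mem_ofList _ _).1 ha
        have hb' : b = x := by simpa using hb
        subst hb'
        rw [List.idxOf_append_of_mem ha']
        have h1 : xs.idxOf a < xs.length := List.idxOf_lt_length_of_mem ha'
        have h2 : (xs ++ [b]).idxOf b = xs.length := by simp [List.idxOf_append, hx']
        rw [h2]; exact_mod_cast h1

-- B's result in the same closed form.
theorem pvB_eq (l : List String) :
    Participantes_alt l
    = (PySem.List.enumerate (PySem.List.dedup l) 1).map (fun p => (p.2, [p.1, 0, 0])) := by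
  unfold Participantes_alt
  set first : PySem.Dict String Int :=
    ((PySem.List.enumerate l 0).reverse).foldl (fun d p => d.insert p.2 p.1) PySem.Dict.empty
    with hfirst
  -- keys of the backwards pass: distinct names, last occurrence first
  have hkeys : first.keys = PySem.Set.ofList l.reverse := by
    rw [hfirst, PySem.Dict.keys_foldl_insert_key ((PySem.List.enumerate l 0).reverse)
          (fun p => p.2) (fun d p => p.1) PySem.Dict.empty]
    rw [PySem.Dict.keys_empty, PySem.Set.update_nil_left, List.map_reverse,
        PySem.List.map_snd_enumerate]
  have hnodup : first.keys.Nodup := by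
    rw [hkeys]; exact PySem.Set.nodup_ofList l.reverse
  -- each key's stored value is its first-occurrence index in l
  have hget : ∀ x ∈ l, first.get? x = some ((l.idxOf x : Int)) := by
    intro x hx
    rw [hfirst, pvGetFold, List.reverse_reverse, pvFindEnum l 0 x hx]
    simp
  -- items of the backwards dict, as a map over its keys
  have hitems : first.items = (PySem.Set.ofList l.reverse).map (fun k => (k, (l.idxOf k : Int))) := by
    rw [PySem.Dict.items_eq_map_keys first hnodup 0, hkeys]
    refine List.map_congr_left ?_
    intro k hk
    have hk' : k ∈ l := by
      have := (PySem.Set.mem_ofList _ _).1 hk; simpa using this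
    simp [PySem.Dict.getD_eq_get?_getD, hget k hk']
  -- the sorted items are exactly the dedup list tagged with its indices
  have hperm : ((PySem.List.dedup l).map (fun k => (k, (l.idxOf k : Int)))).Perm first.items := by
    rw [hitems]
    refine List.Perm.map _ ?_
    refine (List.perm_ext_iff_of_nodup ?_ ?_).2 ?_
    · rw [PySem.List.dedup_eq_ofList]; exact PySem.Set.nodup_ofList l
    · exact PySem.Set.nodup_ofList l.reverse
    · intro a
      rw [PySem.List.mem_dedup, PySem.Set.mem_ofList, List.mem_reverse]
  have hpw : ((PySem.List.dedup l).map (fun k => (k, (l.idxOf k : Int)))).Pairwise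
      (fun p q => p.2 < q.2) := by
    rw [List.pairwise_map]; exact pvDedupMono l
  have hsorted : PySem.List.sorted first.items (fun kv => kv.2) false
      = (PySem.List.dedup l).map (fun k => (k, (l.idxOf k : Int))) :=
    PySem.List.sorted_eq_of_perm_of_pairwise_lt _ _ _ hperm hpw
  show (PySem.List.enumerate (PySem.List.sorted first.items fun kv => kv.2) 1).map
      (fun q => (q.2.1, ([q.1, 0, 0] : List Int)))
    = (PySem.List.enumerate (PySem.List.dedup l) 1).map (fun p => (p.2, [p.1, 0, 0]))
  rw [hsorted, pvEnumMap, List.map_map]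
  rfl

-- ===== VERDICT (by name: the statement is the Claim_ definition above) =====
theorem Participantes_spec : Claim_equal_Participantes := by
  intro l _
  show Participantes l = Participantes_alt l
  rw [pvA_eq, pvB_eq]
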